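-- pv_equiv track=rewrite | github.com/KyverKyvernitis/tts-bot | cogs/gincana/games/corrida.py | _shared_rank_map
-- ===== SOURCE A (Python) =====
-- def _shared_rank_map(arrival_groups: list[list[int]]) -> dict[int, int]:
--     rank_map: dict[int, int] = {}
--     next_rank = 1
--     for group in arrival_groups:
--         for user_id in group:
--             rank_map[int(user_id)] = next_rank
--         next_rank += len(group)
--     return rank_map
-- ===== SOURCE B (Python) =====
-- def _shared_rank_map(arrival_groups: list[list[int]]) -> dict[int, int]:
--     # Recursive shift-merge: rank map of the tail (ranks from 1) is computed first,
--     # then merged into the head group's map with every rank shifted by len(first).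
--     if not arrival_groups:
--         return {}
--     first, rest = arrival_groups[0], arrival_groups[1:]
--     result = {int(u): 1 for u in first}
--     shift = len(first)
--     for uid, rank in _shared_rank_map(rest).items():
--         result[uid] = rank + shift
--     return result
-- ===== Notes on version B (the rewrite author's own statement) =====
-- stated objective: alternative
-- what changed: B is recursive on the structure: it computes the tail's rank map independently (ranks starting at 1) and merges it into the head group's map shifting every rank by len(first), instead of A's single pass threading a global next_rank counter.
import Mathlib
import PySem

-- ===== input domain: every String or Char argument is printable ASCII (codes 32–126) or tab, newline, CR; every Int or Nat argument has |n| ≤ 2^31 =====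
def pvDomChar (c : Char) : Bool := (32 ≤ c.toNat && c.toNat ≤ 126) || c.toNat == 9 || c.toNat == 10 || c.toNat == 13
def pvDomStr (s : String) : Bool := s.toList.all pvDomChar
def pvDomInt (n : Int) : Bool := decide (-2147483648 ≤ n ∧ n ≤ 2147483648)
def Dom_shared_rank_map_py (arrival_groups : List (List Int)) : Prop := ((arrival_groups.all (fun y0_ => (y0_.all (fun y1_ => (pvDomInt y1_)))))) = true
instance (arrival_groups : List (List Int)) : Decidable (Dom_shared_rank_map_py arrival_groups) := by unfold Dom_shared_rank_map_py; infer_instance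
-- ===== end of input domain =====

-- B replaces A's global next_rank accumulator by structural recursion: the tail's rank map
-- is built independently (ranks from 1) and merged in with a shift of len(first); objective: alternative (same cost class).


-- ===== PORT A =====
-- rank_map = {}; next_rank = 1; nested for-loops threading (rank_map, next_rank)
def shared_rank_map_py (arrival_groups : List (List Int)) : List (Int × Int) :=
  (arrival_groups.foldl
    (fun (st : PySem.Dict Int Int × Int) group =>
      (group.foldl (fun d user_id => d.insert user_id st.2) st.1,
       st.2 + (group.length : Int)))
    (PySem.Dict.empty, 1)).1.items

-- ===== PORT B =====
-- if not arrival_groups: return {}; result = {u: 1 for u in first};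
-- for uid, rank in _shared_rank_map(rest).items(): result[uid] = rank + len(first)
def shared_rank_map_py_alt : List (List Int) → List (Int × Int)
  | [] => (PySem.Dict.empty : PySem.Dict Int Int).items
  | first :: rest =>
    let result := first.foldl (fun (d : PySem.Dict Int Int) u => d.insert u 1) PySem.Dict.empty
    let shift : Int := (first.length : Int)
    ((shared_rank_map_py_alt rest).foldl
        (fun (d : PySem.Dict Int Int) kv => d.insert kv.1 (kv.2 + shift)) result).items

-- ===== PRECONDITION & SPEC =====
def Spec_shared_rank_map_py (arrival_groups : List (List Int)) (out : List (Int × Int)) : Prop := out = shared_rank_map_py_alt arrival_groups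
instance (arrival_groups : List (List Int)) (out : List (Int × Int)) : Decidable (Spec_shared_rank_map_py arrival_groups out) := by unfold Spec_shared_rank_map_py; infer_instance

-- ===== CLAIM (what is proved, stated in full; the proofs are below) =====
def Claim_equal_shared_rank_map_py : Prop := ∀ (arrival_groups : List (List Int)), Dom_shared_rank_map_py arrival_groups → Spec_shared_rank_map_py arrival_groups (shared_rank_map_py arrival_groups)

-- ===== LEMMAS AND PROOFS =====

-- plain insertion of an item, and insertion with every value shifted by c
def pvIns (d : PySem.Dict Int Int) (kv : Int × Int) : PySem.Dict Int Int := d.insert kv.1 kv.2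
def pvInsC (c : Int) (d : PySem.Dict Int Int) (kv : Int × Int) : PySem.Dict Int Int := d.insert kv.1 (kv.2 + c)

-- the flat list of (user, rank) assignments A performs, starting at rank r
def pvAll : List (List Int) → Int → List (Int × Int)
  | [], _ => []
  | g :: gs, r => g.map (fun u => (u, r)) ++ pvAll gs (r + (g.length : Int))

-- A's fold is the fold of pvAll
theorem pvLA (gs : List (List Int)) (d : PySem.Dict Int Int) (r : Int) :
    (gs.foldl
      (fun (st : PySem.Dict Int Int × Int) group =>
        (group.foldl (fun d user_id => d.insert user_id st.2) st.1,
         st.2 + (group.length : Int))) (d, r)).1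
    = (pvAll gs r).foldl pvIns d := by
  induction gs generalizing d r with
  | nil => rfl
  | cons g gs ih =>
    simp only [List.foldl_cons, pvAll, List.foldl_append, ih, List.foldl_map]
    rfl

-- shifting every rank in pvAll
theorem pvShift (gs : List (List Int)) (r c : Int) :
    (pvAll gs r).map (fun kv => (kv.1, kv.2 + c)) = pvAll gs (r + c) := by
  induction gs generalizing r with
  | nil => rfl
  | cons g gs ih =>
    simp only [pvAll, List.map_append, List.map_map, ih]
    have : r + (g.length : Int) + c = r + c + (g.length : Int) := by ring
    rw [this]
    rfl

theorem pvSwap (d : PySem.Dict Int Int) (k k2 b w2 : Int) (hne : k2 ≠ k)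
    (hk : d.contains k = true) :
    (d.insert k2 w2).insert k b = (d.insert k b).insert k2 w2 := by
  apply PySem.Dict.ext
  have hck : (d.insert k2 w2).contains k = true := by
    rw [PySem.Dict.contains_insert]; simp [hk]
  have hck2 : (d.insert k b).contains k2 = d.contains k2 := by
    rw [PySem.Dict.contains_insert]; simp [hne]
  by_cases h2 : d.contains k2 = true
  · rw [PySem.Dict.items_insert_of_contains _ _ hck,
        PySem.Dict.items_insert_of_contains _ _ h2,
        PySem.Dict.items_insert_of_contains _ _ (hck2.trans h2),
        PySem.Dict.items_insert_of_contains _ _ hk]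
    simp only [List.map_map]
    apply List.map_congr_left
    intro p _
    by_cases hpk : p.1 = k <;> by_cases hpk2 : p.1 = k2 <;>
      simp [Function.comp, hpk, hpk2, hne, Ne.symm hne]
  · have h2' : d.contains k2 = false := by simpa using h2
    rw [PySem.Dict.items_insert_of_contains _ _ hck,
        PySem.Dict.items_insert_of_not_contains _ _ h2',
        PySem.Dict.items_insert_of_not_contains _ _ (hck2.trans h2'),
        PySem.Dict.items_insert_of_contains _ _ hk]
    simp [hne]

theorem pvS (tl : List (Int × Int)) (c : Int) (k b : Int) :
    ∀ (d : PySem.Dict Int Int), d.contains k = true → k ∉ tl.map Prod.fst →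
    (tl.foldl (pvInsC c) d).insert k b = tl.foldl (pvInsC c) (d.insert k b) := by
  induction tl with
  | nil => intro d _ _; rfl
  | cons p tl ih =>
    intro d hk hmem
    simp only [List.map_cons, List.mem_cons] at hmem
    have hp : k ≠ p.1 := fun h => hmem (Or.inl h)
    have htl : k ∉ tl.map Prod.fst := fun h => hmem (Or.inr h)
    simp only [List.foldl_cons, pvInsC]
    rw [ih _ (by rw [PySem.Dict.contains_insert]; simp [hk]) htl,
        pvSwap d k p.1 b (p.2 + c) (fun h => hp h.symm) hk]

theorem pvH2 (v c : Int) (k : Int) :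
    ∀ (l : List (Int × Int)), (l.map Prod.fst).Nodup → l.any (fun p => p.1 == k) = true →
    ∀ (d : PySem.Dict Int Int),
    ((l.map (fun p => if p.1 == k then (k, v) else p)).foldl (pvInsC c) d)
      = (l.foldl (pvInsC c) d).insert k (v + c) := by
  intro l
  induction l with
  | nil => intro _ h; simp at h
  | cons p tl ih =>
    intro hnd hany d
    simp only [List.map_cons, List.nodup_cons] at hnd
    obtain ⟨hp, hndtl⟩ := hnd
    by_cases hpk : p.1 = k
    · subst hpk
      have hktl : p.1 ∉ tl.map Prod.fst := hp
      have hmap : tl.map (fun q => if q.1 == p.1 then (p.1, v) else q) = tl := by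
        conv_rhs => rw [← List.map_id tl]
        apply List.map_congr_left
        intro q hq
        have : q.1 ≠ p.1 := fun h => hktl (h ▸ List.mem_map_of_mem hq)
        simp [this]
      simp only [List.map_cons, BEq.rfl, if_pos, List.foldl_cons, hmap, pvInsC]
      rw [pvS tl c p.1 (v + c) _ (by rw [PySem.Dict.contains_insert]; simp) hktl,
          PySem.Dict.insert_insert_self]
    · have hbpk : (p.1 == k) = false := by simp [hpk]
      have hany' : tl.any (fun q => q.1 == k) = true := by
        have h := hany
        simp only [List.any_cons, hbpk, Bool.false_or] at h
        exact h
      simp only [List.map_cons, List.foldl_cons]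
      rw [if_neg (by simp [hpk])]
      exact ih hndtl hany' (pvInsC c d p)

theorem pvH (e : PySem.Dict Int Int) (he : e.keys.Nodup) (k v c : Int) (d : PySem.Dict Int Int) :
    ((e.insert k v).items).foldl (pvInsC c) d = (e.items.foldl (pvInsC c) d).insert k (v + c) := by
  by_cases hc : e.contains k = true
  · rw [PySem.Dict.items_insert_of_contains _ _ hc]
    exact pvH2 v c k e.items (by simpa [PySem.Dict.keys] using he)
      (by simpa [PySem.Dict.contains] using hc) d
  · rw [PySem.Dict.items_insert_of_not_contains _ _ (by simpa using hc)]
    simp [pvInsC]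

theorem pvLR (l : List (Int × Int)) (c : Int) :
    ∀ (e : PySem.Dict Int Int), e.keys.Nodup → ∀ (d : PySem.Dict Int Int),
    ((l.foldl pvIns e).items).foldl (pvInsC c) d = l.foldl (pvInsC c) (e.items.foldl (pvInsC c) d) := by
  induction l with
  | nil => intro e _ d; rfl
  | cons kv tl ih =>
    intro e he d
    simp only [List.foldl_cons, pvIns]
    rw [ih (e.insert kv.1 kv.2) (PySem.Dict.nodup_keys_insert _ _ _ he) d, pvH e he]
    rfl

-- B equals the fold of pvAll starting at rank 1
theorem pvLB (gs : List (List Int)) :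
    shared_rank_map_py_alt gs = ((pvAll gs 1).foldl pvIns PySem.Dict.empty).items := by
  induction gs with
  | nil => rfl
  | cons g gs ih =>
    show ((shared_rank_map_py_alt gs).foldl
        (fun (d : PySem.Dict Int Int) kv => d.insert kv.1 (kv.2 + (g.length : Int)))
        (g.foldl (fun (d : PySem.Dict Int Int) u => d.insert u 1) PySem.Dict.empty)).items = _
    rw [ih]
    show ((((pvAll gs 1).foldl pvIns PySem.Dict.empty).items).foldl (pvInsC (g.length : Int))
        (g.foldl (fun (d : PySem.Dict Int Int) u => d.insert u 1) PySem.Dict.empty)).items = _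
    rw [pvLR (pvAll gs 1) ((g.length : Int)) PySem.Dict.empty
          (by simp [PySem.Dict.keys_empty])
          (g.foldl (fun (d : PySem.Dict Int Int) u => d.insert u 1) PySem.Dict.empty)]
    show ((pvAll gs 1).foldl (pvInsC (g.length : Int))
        (g.foldl (fun (d : PySem.Dict Int Int) u => d.insert u 1) PySem.Dict.empty)).items = _
    have hstep : ∀ (d0 : PySem.Dict Int Int),
        List.foldl (pvInsC (g.length : Int)) d0 (pvAll gs 1)
          = List.foldl pvIns d0 (pvAll gs (1 + (g.length : Int))) := by
      intro d0
      rw [← pvShift gs 1 (g.length : Int), List.foldl_map]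
      rfl
    rw [hstep,
        show g.foldl (fun (d : PySem.Dict Int Int) u => d.insert u 1) PySem.Dict.empty
            = (g.map (fun u => (u, (1 : Int)))).foldl pvIns PySem.Dict.empty by
          rw [List.foldl_map]; rfl]
    show ((pvAll gs (1 + (g.length : Int))).foldl pvIns
        ((g.map (fun u => (u, (1 : Int)))).foldl pvIns PySem.Dict.empty)).items = _
    rw [← List.foldl_append]
    rfl

-- ===== VERDICT (by name: the statement is the Claim_ definition above) =====
theorem shared_rank_map_py_spec : Claim_equal_shared_rank_map_py := by
  intro gs _
  unfold Spec_shared_rank_map_py shared_rank_map_py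
  rw [pvLA, pvLB]
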